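-- pv_equiv track=rewrite | github.com/qGamerw/cfg-to-chomsky-schutzenberger-gui | parse_tree.py | _segment_text_with_terminals
-- ===== SOURCE A (Python) =====
-- def _segment_text_with_terminals(text, terminals, max_variants=256):
--     """Разбивает компактную строку на токены терминалов грамматики."""
--     if not text:
--         return [[]]
--
--     term_list = sorted({t for t in terminals if t}, key=len, reverse=True)
--     memo = {}
--
--     def dfs(pos):
--         if pos == len(text):
--             return [[]]
--         if pos in memo:
--             return memo[pos]
--
--         variants = []
--         for t in term_list:
--             if text.startswith(t, pos):
--                 suffixes = dfs(pos + len(t))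
--                 for suf in suffixes:
--                     variants.append([t] + suf)
--                     if len(variants) >= max_variants:
--                         memo[pos] = variants
--                         return variants
--
--         memo[pos] = variants
--         return variants
--
--     return dfs(0)
-- ===== SOURCE B (Python) =====
-- def _segment_text_with_terminals(text, terminals, max_variants=256):
--     """Bottom-up DP over suffix positions with forward-reachability pruning and
--     suffix-sharing (token, rest) chains, instead of memoized top-down DFS."""
--     if not text:
--         return [[]]
--     term_list = sorted({t for t in terminals if t}, key=len, reverse=True)
--     n = len(text)
--     reach = [False] * (n + 1)
--     reach[0] = True
--     for pos in range(n):
--         if reach[pos]: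
--             for t in term_list:
--                 if text.startswith(t, pos):
--                     reach[pos + len(t)] = True
--     # table[pos] holds up to max_variants segmentations of text[pos:], each as a
--     # shared linked chain (token, rest_chain) ending in None
--     table = [[] for _ in range(n)] + [[None]]
--     for pos in range(n - 1, -1, -1):
--         if reach[pos]:
--             vs = []
--             for t in term_list:
--                 if len(vs) >= max_variants:
--                     break
--                 if text.startswith(t, pos):
--                     vs += [(t, suf) for suf in table[pos + len(t)][:max_variants - len(vs)]]
--             table[pos] = vs
--     out = []
--     for chain in table[0]:
--         tokens = []
--         while chain is not None:
--             tokens.append(chain[0])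
--             chain = chain[1]
--         out.append(tokens)
--     return out
-- ===== Notes on version B (the rewrite author's own statement) =====
-- stated objective: alternative
-- what changed: Replaces A's memoized top-down DFS (closure recursion with a memo dict and early returns) by an iterative bottom-up DP that first marks the positions reachable from the start and then fills a table of capped segmentation lists per suffix position, sharing suffixes via (token, rest) chains.
-- outside the precondition, e.g. on _segment_text_with_terminals('ab', ['ab'], 0): A returns [['ab']], B returns []
import Mathlib
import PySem

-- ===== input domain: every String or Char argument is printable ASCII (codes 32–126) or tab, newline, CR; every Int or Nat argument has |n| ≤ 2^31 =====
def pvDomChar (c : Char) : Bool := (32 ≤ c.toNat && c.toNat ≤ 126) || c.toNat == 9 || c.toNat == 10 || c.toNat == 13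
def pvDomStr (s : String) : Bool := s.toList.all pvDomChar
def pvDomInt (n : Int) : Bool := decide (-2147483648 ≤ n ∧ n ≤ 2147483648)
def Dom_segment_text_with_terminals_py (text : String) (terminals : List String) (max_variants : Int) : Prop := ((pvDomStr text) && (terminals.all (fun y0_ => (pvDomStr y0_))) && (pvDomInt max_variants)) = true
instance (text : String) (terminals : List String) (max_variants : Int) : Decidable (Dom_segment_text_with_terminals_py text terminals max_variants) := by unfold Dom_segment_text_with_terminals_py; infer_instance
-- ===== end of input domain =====

-- B replaces A's memoized top-down DFS by an iterative bottom-up DP table over suffix positions,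
-- with a forward-reachability pre-pass and suffix-sharing variant chains; equality of the RETURN
-- values is proved on Pre_ (max_variants ≥ 1).

-- ===== PORT A =====
-- shared preprocessing line of both Pythons: sorted({t for t in terminals if t}, key=len, reverse=True)
def pvTermList (terminals : List String) : List String :=
  PySem.List.sorted (PySem.Set.ofList (terminals.filter (fun t => t ≠ ""))) (fun t => t.toList.length) true

-- inner 'for suf in suffixes: variants.append([t]+suf); if len(variants) >= max_variants: return'
-- returns the grown variants list and whether the early return fired
def pvAppendCap (t : String) (maxv : Int) (variants : List (List String)) : List (List String) → List (List String) × Bool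
  | [] => (variants, false)
  | suf :: sufs =>
    let v' := variants ++ [t :: suf]
    if maxv ≤ PySem.List.len v' then (v', true) else pvAppendCap t maxv v' sufs

-- dfs(pos) ported as recursion on the suffix text[pos:]; the memo dict is pure caching of dfs's
-- value (each entry is written with exactly the value dfs returns), so reads of it are the
-- recursive calls themselves and the port elides the dict.  The 't.toList ≠ []' conjunct is a
-- totality guard only: pvTermList never contains "" (Python checks just startswith).
mutual
def pvDfsA (terms : List String) (maxv : Int) (rest : List Char) : List (List String) :=
  if rest.isEmpty then [[]]
  else pvLoopA terms maxv rest terms []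
termination_by (rest.length, 1, 0)
decreasing_by
  simp_wf
  exact Prod.Lex.right _ (Prod.Lex.left _ _ (by omega))

def pvLoopA (terms : List String) (maxv : Int) (rest : List Char) : List String → List (List String) → List (List String)
  | [], variants => variants
  | t :: ts, variants =>
    if h : t.toList ≠ [] ∧ PySem.Chars.startswith rest t.toList = true then
      let sufs := pvDfsA terms maxv (rest.drop t.toList.length)
      let r := pvAppendCap t maxv variants sufs
      if r.2 then r.1 else pvLoopA terms maxv rest ts r.1
    else pvLoopA terms maxv rest ts variants
termination_by l variants => (rest.length, 0, l.length)
decreasing_by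
  · have hpre : t.toList <+: rest := (PySem.Chars.startswith_iff rest t.toList).mp h.2
    have h1 : 1 ≤ t.toList.length := by
      cases ht : t.toList with
      | nil => exact absurd ht h.1
      | cons a l => simp
    have h2 : t.toList.length ≤ rest.length := hpre.length_le
    simp_wf
    exact Prod.Lex.left _ _ (by have h3 := t.length_toList; omega)
  · simp_wf; exact Prod.Lex.right _ (Prod.Lex.right _ (by omega))
  · simp_wf; exact Prod.Lex.right _ (Prod.Lex.right _ (by omega))
end

def segment_text_with_terminals_py (text : String) (terminals : List String) (max_variants : Int) : List (List String) :=
  if text.toList.isEmpty then [[]]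
  else pvDfsA (pvTermList terminals) max_variants text.toList

-- ===== PORT B =====
-- 'while chain is not None: tokens.append(chain[0]); chain = chain[1]' — Python's linked
-- (token, rest) chains ending in None are exactly Lean lists, so the walk is this traversal
def pvExpand : List String → List String
  | [] => []
  | tok :: rest => tok :: pvExpand rest

-- inner 'for t in term_list: if text.startswith(t, pos): reach[pos + len(t)] = True'
def pvMark (text : List Char) (pos : Nat) : List String → List Bool → List Bool
  | [], reach => reach
  | t :: ts, reach =>
    if PySem.Chars.startswith (text.drop pos) t.toList = true then
      pvMark text pos ts (reach.set (pos + t.toList.length) true)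
    else pvMark text pos ts reach

-- the forward pass 'for pos in range(n): if reach[pos]: …'
def pvReach (terms : List String) (text : List Char) : List Bool :=
  (List.range text.length).foldl
    (fun reach pos => if reach.getD pos false then pvMark text pos terms reach else reach)
    ((List.replicate (text.length + 1) false).set 0 true)

-- 'for t in term_list: if len(vs) >= max_variants: break; if startswith: vs += [(t, suf) for suf
-- in table[pos+len(t)][:max_variants-len(vs)]]'; tabs is [table[pos+1], …, table[n]], so
-- table[pos+len(t)] is tabs[len(t)-1]
def pvEntryLoop (text : List Char) (maxv : Int) (pos : Nat) (tabs : List (List (List String))) : List String → List (List String) → List (List String)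
  | [], vs => vs
  | t :: ts, vs =>
    if maxv ≤ PySem.List.len vs then vs
    else if PySem.Chars.startswith (text.drop pos) t.toList = true then
      pvEntryLoop text maxv pos tabs ts
        (vs ++ (PySem.List.slice (tabs.getD (t.toList.length - 1) []) none (some (maxv - PySem.List.len vs))).map (fun suf => t :: suf))
    else pvEntryLoop text maxv pos tabs ts vs

-- 'for pos in range(n-1, -1, -1): if reach[pos]: table[pos] = …', consing each entry in front
def pvBuildB (terms : List String) (maxv : Int) (text : List Char) (reach : List Bool) : Nat → List (List (List String))
  | 0 => [[[]]]
  | k+1 =>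
    let tabs := pvBuildB terms maxv text reach k
    (if reach.getD (text.length - (k+1)) false = true then
        pvEntryLoop text maxv (text.length - (k+1)) tabs terms []
      else []) :: tabs

def segment_text_with_terminals_py_alt (text : String) (terminals : List String) (max_variants : Int) : List (List String) :=
  if text.toList.isEmpty then [[]]
  else
    ((pvBuildB (pvTermList terminals) max_variants text.toList
        (pvReach (pvTermList terminals) text.toList) text.toList.length).headD []).map pvExpand

-- ===== PRECONDITION & SPEC =====
-- Pre_ excludes non-positive max_variants: a nonsensical cap, on which A's check (run only after
-- the first append) still yields one variant per position while B naturally yields none; neither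
-- behaviour is specified for such a cap.
def Pre_segment_text_with_terminals_py (text : String) (terminals : List String) (max_variants : Int) : Prop := 1 ≤ max_variants
instance (text : String) (terminals : List String) (max_variants : Int) : Decidable (Pre_segment_text_with_terminals_py text terminals max_variants) := by unfold Pre_segment_text_with_terminals_py; infer_instance

def pvWitness_segment_text_with_terminals_py : String × List String × Int := ("ab", (["ab", "a", "b"], 2))

def Spec_segment_text_with_terminals_py (text : String) (terminals : List String) (max_variants : Int) (out : List (List String)) : Prop := out = segment_text_with_terminals_py_alt text terminals max_variants
instance (text : String) (terminals : List String) (max_variants : Int) (out : List (List String)) : Decidable (Spec_segment_text_with_terminals_py text terminals max_variants out) := by unfold Spec_segment_text_with_terminals_py; infer_instance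

-- ===== CLAIM (what is proved, stated in full; the proofs are below) =====
def Claim_equal_segment_text_with_terminals_py : Prop := ∀ (text : String) (terminals : List String) (max_variants : Int), Dom_segment_text_with_terminals_py text terminals max_variants → Pre_segment_text_with_terminals_py text terminals max_variants → Spec_segment_text_with_terminals_py text terminals max_variants (segment_text_with_terminals_py text terminals max_variants)

-- ===== LEMMAS AND PROOFS =====

theorem pvAppendCap_eq (t : String) (maxv : Int) (h1 : 1 ≤ maxv)
    (variants sufs : List (List String)) (hv : variants.length < maxv.toNat) :
    pvAppendCap t maxv variants sufs =
      ((variants ++ sufs.map (fun s => t :: s)).take maxv.toNat,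
       decide (maxv.toNat ≤ variants.length + sufs.length)) := by
  induction sufs generalizing variants with
  | nil =>
    have hd : ¬ (maxv.toNat ≤ variants.length + ([] : List (List String)).length) := by
      simp; omega
    simp [pvAppendCap, List.take_of_length_le (le_of_lt hv), hd]
    omega
  | cons s ss ih =>
    simp only [pvAppendCap, PySem.List.len_eq]
    split
    · next hcond =>
      have hc : maxv.toNat = (variants ++ [t :: s]).length := by
        simp at hcond ⊢; omega
      rw [List.map_cons]
      conv_rhs => rw [List.append_cons]
      rw [hc, List.take_left]
      have hd : (variants ++ [t :: s]).length ≤ variants.length + (s :: ss).length := by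
        simp
      simp [hd]
    · next hcond =>
      have hlt : (variants ++ [t :: s]).length < maxv.toNat := by
        simp at hcond ⊢; omega
      rw [ih _ hlt, List.map_cons]
      conv_rhs => rw [List.append_cons]
      simp only [Prod.mk.injEq, true_and]
      rw [decide_eq_decide]
      simp; omega

theorem pvLoopA_eq (terms : List String) (maxv : Int) (h1 : 1 ≤ maxv) (rest : List Char)
    (l : List String) (variants : List (List String)) (hv : variants.length < maxv.toNat) :
    pvLoopA terms maxv rest l variants =
      (variants ++ l.flatMap (fun t =>
        if t.toList ≠ [] ∧ PySem.Chars.startswith rest t.toList = true then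
          (pvDfsA terms maxv (rest.drop t.toList.length)).map (fun s => t :: s)
        else [])).take maxv.toNat := by
  induction l generalizing variants with
  | nil =>
    simp [pvLoopA, List.take_of_length_le (le_of_lt hv)]
  | cons t ts ih =>
    simp only [pvLoopA, List.flatMap_cons]
    split
    · next h =>
      rw [pvAppendCap_eq t maxv h1 variants _ hv]
      dsimp only
      simp only [String.length_toList]
      by_cases hdone : maxv.toNat ≤ variants.length + (pvDfsA terms maxv (rest.drop t.length)).length
      · simp only [hdone, decide_true, if_true]
        rw [← List.append_assoc,
          List.take_append_of_le_length (l₂ := ts.flatMap _) (by simp; omega)]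
      · simp only [hdone, decide_false, Bool.false_eq_true, if_false]
        rw [List.take_of_length_le (by simp; omega)]
        rw [ih _ (by simp; omega), List.append_assoc]
        simp [String.length_toList]
    · next h =>
      rw [ih _ hv]
      simp

theorem pvTermList_ne_nil (terminals : List String) :
    ∀ t ∈ pvTermList terminals, t.toList ≠ [] := by
  intro t ht
  have h2 : t ∈ PySem.Set.ofList (terminals.filter (fun t => t ≠ "")) :=
    (PySem.List.mem_sorted _ _ _ _).mp ht
  have h3 : t ∈ terminals.filter (fun t => t ≠ "") := (PySem.Set.mem_ofList _ _).mp h2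
  have h4 : t ≠ "" := by
    have := List.of_mem_filter h3
    simpa using this
  intro hnil
  exact h4 (String.toList_eq_nil_iff.mp hnil)

-- identity of the chain walk
theorem pvExpand_id (l : List String) : pvExpand l = l := by
  induction l with
  | nil => rfl
  | cons tok rest ih => simp [pvExpand, ih]

theorem pvTakeSub (A R : List α) (r : Nat) : (A.take r ++ R).take r = (A ++ R).take r := by
  rw [List.take_append, List.take_append, List.take_take, Nat.min_self]
  congr 2
  rw [List.length_take]
  omega

theorem pvTakeChunk (vs A R : List α) (cap : Nat) :
    ((vs ++ A.take (cap - vs.length)) ++ R).take cap = (vs ++ (A ++ R)).take cap := by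
  rw [List.append_assoc, List.take_append, pvTakeSub, ← List.take_append]

theorem pvEntryLoop_eq (text : List Char) (maxv : Int) (h1 : 1 ≤ maxv) (pos : Nat)
    (tabs : List (List (List String))) (l : List String) (vs : List (List String))
    (hv : vs.length ≤ maxv.toNat) :
    pvEntryLoop text maxv pos tabs l vs =
      (vs ++ l.flatMap (fun t =>
        if PySem.Chars.startswith (text.drop pos) t.toList = true then
          (tabs.getD (t.toList.length - 1) []).map (fun s => t :: s)
        else [])).take maxv.toNat := by
  induction l generalizing vs with
  | nil => simp [pvEntryLoop, List.take_of_length_le hv]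
  | cons t ts ih =>
    simp only [pvEntryLoop, PySem.List.len_eq, List.flatMap_cons]
    split
    · next hfull =>
      have hlen : vs.length = maxv.toNat := by omega
      rw [List.take_append_of_le_length (by omega), List.take_of_length_le (by omega)]
    · next hfull =>
      have hroom : vs.length < maxv.toNat := by omega
      split
      · next hsw =>
        rw [PySem.List.slice_to _ (b := maxv - vs.length) (by omega)]
        have hr : (maxv - (vs.length : Int)).toNat = maxv.toNat - vs.length := by omega
        rw [hr, ih _ (by simp [List.length_take]; omega)]
        rw [List.map_take, pvTakeChunk]
      · next hsw =>
        rw [ih _ hv]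
        simp

theorem pvMark_length (text : List Char) (pos : Nat) (ts : List String) (r : List Bool) :
    (pvMark text pos ts r).length = r.length := by
  induction ts generalizing r with
  | nil => rfl
  | cons t ts ih =>
    simp only [pvMark]
    split
    · rw [ih, List.length_set]
    · rw [ih]

theorem pvMark_getD_le (text : List Char) (pos : Nat) (ts : List String) (r : List Bool)
    (hts : ∀ t ∈ ts, t.toList ≠ []) (i : Nat) (hi : i ≤ pos) :
    (pvMark text pos ts r).getD i false = r.getD i false := by
  induction ts generalizing r with
  | nil => rfl
  | cons t ts ih =>
    have htne : t.toList ≠ [] := hts t (by simp)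
    have hL : 1 ≤ t.toList.length := by
      cases hx : t.toList with
      | nil => exact absurd hx htne
      | cons a l => simp
    simp only [pvMark]
    split
    · rw [ih _ (fun u hu => hts u (List.mem_cons_of_mem _ hu))]
      rw [List.getD, List.getElem?_set_ne (by omega), ← List.getD]
    · exact ih _ (fun u hu => hts u (List.mem_cons_of_mem _ hu))

theorem pvMark_getD_mono (text : List Char) (pos : Nat) (ts : List String) (r : List Bool)
    (i : Nat) (h : r.getD i false = true) :
    (pvMark text pos ts r).getD i false = true := by
  induction ts generalizing r with
  | nil => exact h
  | cons t ts ih =>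
    simp only [pvMark]
    split
    · apply ih
      rw [List.getD]
      by_cases hij : pos + t.toList.length = i
      · subst hij
        by_cases hlt : pos + t.toList.length < r.length
        · rw [List.getElem?_set_self (by omega)]
          simp
        · rw [List.set_eq_of_length_le (by omega), ← List.getD]
          exact h
      · rw [List.getElem?_set_ne hij, ← List.getD]
        exact h
    · exact ih r h

theorem pvMark_sets (text : List Char) (pos : Nat) (ts : List String) (r : List Bool)
    (t : String) (ht : t ∈ ts)
    (hsw : PySem.Chars.startswith (text.drop pos) t.toList = true)
    (hlen : pos + t.toList.length < r.length) :
    (pvMark text pos ts r).getD (pos + t.toList.length) false = true := by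
  induction ts generalizing r with
  | nil => cases ht
  | cons u ts ih =>
    simp only [pvMark]
    rcases List.mem_cons.mp ht with rfl | htts
    · rw [if_pos hsw]
      apply pvMark_getD_mono
      rw [List.getD, List.getElem?_set_self (by omega)]
      simp
    · split
      · exact ih _ htts (by rw [List.length_set]; exact hlen)
      · exact ih _ htts hlen

theorem pvFold_length (text : List Char) (terms : List String) (l : List Nat) (r : List Bool) :
    (l.foldl (fun reach pos => if reach.getD pos false then pvMark text pos terms reach else reach) r).length = r.length := by
  induction l generalizing r with
  | nil => rfl
  | cons q l ih =>
    simp only [List.foldl_cons]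
    rw [ih]
    split
    · exact pvMark_length text q terms r
    · rfl

theorem pvFold_stable (text : List Char) (terms : List String)
    (hterms : ∀ t ∈ terms, t.toList ≠ []) (l : List Nat) (r : List Bool) (i : Nat)
    (hq : ∀ q ∈ l, i ≤ q) :
    (l.foldl (fun reach pos => if reach.getD pos false then pvMark text pos terms reach else reach) r).getD i false = r.getD i false := by
  induction l generalizing r with
  | nil => rfl
  | cons q l ih =>
    simp only [List.foldl_cons]
    rw [ih _ (fun u hu => hq u (by simp [hu]))]
    split
    · exact pvMark_getD_le text q terms r hterms i (hq q (by simp))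
    · rfl

theorem pvFold_mono (text : List Char) (terms : List String) (l : List Nat) (r : List Bool)
    (i : Nat) (h : r.getD i false = true) :
    (l.foldl (fun reach pos => if reach.getD pos false then pvMark text pos terms reach else reach) r).getD i false = true := by
  induction l generalizing r with
  | nil => exact h
  | cons q l ih =>
    simp only [List.foldl_cons]
    apply ih
    split
    · exact pvMark_getD_mono text q terms r i h
    · exact h

theorem pvReach_zero (terms : List String) (text : List Char)
    (hterms : ∀ t ∈ terms, t.toList ≠ []) :
    (pvReach terms text).getD 0 false = true := by
  rw [pvReach, pvFold_stable text terms hterms _ _ 0 (fun q _ => Nat.zero_le q)]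
  rw [List.getD, List.getElem?_set_self (by simp)]
  simp

theorem pvReach_closure (terms : List String) (text : List Char)
    (hterms : ∀ t ∈ terms, t.toList ≠ []) (pos : Nat) (hpos : pos < text.length)
    (hr : (pvReach terms text).getD pos false = true) (t : String) (ht : t ∈ terms)
    (hsw : PySem.Chars.startswith (text.drop pos) t.toList = true) :
    (pvReach terms text).getD (pos + t.toList.length) false = true := by
  have hsplit : List.range text.length =
      (List.range pos ++ [pos]) ++ (List.range (text.length - (pos + 1))).map (fun x => (pos + 1) + x) := by
    rw [← List.range_succ, ← List.range_add]
    congr 1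
    omega
  rw [pvReach, hsplit, List.foldl_append, List.foldl_append] at hr ⊢
  set r0 : List Bool := (List.replicate (text.length + 1) false).set 0 true with hr0
  set rpre := List.foldl (fun reach pos => if reach.getD pos false then pvMark text pos terms reach else reach) r0 (List.range pos) with hrpre
  have hrpre_len : rpre.length = text.length + 1 := by
    rw [hrpre, pvFold_length, hr0]
    simp
  have hstab : ∀ i ≤ pos,
      (((List.range (text.length - (pos + 1))).map (fun x => (pos + 1) + x)).foldl
        (fun reach pos => if reach.getD pos false then pvMark text pos terms reach else reach)
        (List.foldl (fun reach pos => if reach.getD pos false then pvMark text pos terms reach else reach) rpre [pos])).getD i false =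
      (List.foldl (fun reach pos => if reach.getD pos false then pvMark text pos terms reach else reach) rpre [pos]).getD i false := by
    intro i hi
    apply pvFold_stable text terms hterms
    intro q hq
    rcases List.mem_map.mp hq with ⟨x, _, rfl⟩
    omega
  have hmid : (List.foldl (fun reach pos => if reach.getD pos false then pvMark text pos terms reach else reach) rpre [pos]).getD pos false = rpre.getD pos false := by
    simp only [List.foldl_cons, List.foldl_nil]
    split
    · exact pvMark_getD_le text pos terms rpre hterms pos (le_refl pos)
    · rfl
  have hrpre_pos : rpre.getD pos false = true := by
    rw [hstab pos (le_refl pos), hmid] at hr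
    exact hr
  have hmid_sets : (List.foldl (fun reach pos => if reach.getD pos false then pvMark text pos terms reach else reach) rpre [pos]).getD (pos + t.toList.length) false = true := by
    simp only [List.foldl_cons, List.foldl_nil]
    rw [if_pos hrpre_pos]
    apply pvMark_sets text pos terms rpre t ht hsw
    have hpref : t.toList <+: text.drop pos := (PySem.Chars.startswith_iff _ _).mp hsw
    have := hpref.length_le
    rw [List.length_drop] at this
    omega
  exact pvFold_mono text terms _ _ _ hmid_sets

theorem pvBuildB_eq (terms : List String) (maxv : Int) (h1 : 1 ≤ maxv) (text : List Char)
    (hterms : ∀ t ∈ terms, t.toList ≠ []) (k : Nat) (hk : k ≤ text.length) :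
    ∀ j ≤ k, (pvReach terms text).getD (text.length - k + j) false = true →
      (pvBuildB terms maxv text (pvReach terms text) k).getD j [] =
        pvDfsA terms maxv (text.drop (text.length - k + j)) := by
  induction k with
  | zero =>
    intro j hj _
    interval_cases j
    simp [pvBuildB, pvDfsA, List.drop_length]
  | succ k ihk =>
    have hk' : k ≤ text.length := Nat.le_of_succ_le hk
    intro j hj hreach
    match j with
    | j' + 1 =>
      simp only [pvBuildB, List.getD_cons_succ]
      have harith : text.length - (k + 1) + (j' + 1) = text.length - k + j' := by omega
      rw [harith] at hreach ⊢
      exact ihk hk' j' (by omega) hreach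
    | 0 =>
      simp only [pvBuildB, List.getD_cons_zero, Nat.add_zero]
      rw [Nat.add_zero] at hreach
      rw [if_pos hreach]
      have hrlen : (text.drop (text.length - (k+1))).length = k + 1 := by
        simp [List.length_drop]; omega
      rw [pvDfsA, if_neg (by
        simp only [List.isEmpty_iff]
        intro hnil
        rw [hnil] at hrlen
        simp at hrlen)]
      rw [pvLoopA_eq terms maxv h1 _ terms [] (by simp only [List.length_nil]; omega)]
      rw [pvEntryLoop_eq text maxv h1 _ _ terms [] (by simp only [List.length_nil]; omega)]
      simp only [List.nil_append]
      congr 1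
      apply List.flatMap_congr
      intro t ht
      have htne : t.toList ≠ [] := hterms t ht
      by_cases hsw : PySem.Chars.startswith (text.drop (text.length - (k+1))) t.toList = true
      · rw [if_pos hsw, if_pos ⟨htne, hsw⟩]
        have hpre : t.toList <+: text.drop (text.length - (k+1)) :=
          (PySem.Chars.startswith_iff _ _).mp hsw
        have hL1 : 1 ≤ t.toList.length := by
          cases hx : t.toList with
          | nil => exact absurd hx htne
          | cons a l => simp
        have hL2 : t.toList.length ≤ k + 1 := by
          have := hpre.length_le
          omega
        congr 1
        have hreach' : (pvReach terms text).getD (text.length - k + (t.toList.length - 1)) false = true := by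
          have harith : text.length - k + (t.toList.length - 1) =
              (text.length - (k + 1)) + t.toList.length := by omega
          rw [harith]
          exact pvReach_closure terms text hterms _ (by omega) hreach t ht hsw
        rw [ihk hk' (t.toList.length - 1) (by omega) hreach']
        rw [List.drop_drop]
        have harith2 : text.length - k + (t.toList.length - 1) =
            text.length - (k + 1) + t.toList.length := by omega
        rw [harith2]
      · rw [if_neg hsw, if_neg (by
          intro hcontra
          exact hsw hcontra.2)]

-- ===== VERDICT (by name: the statement is the Claim_ definition above) =====
theorem segment_text_with_terminals_py_spec : Claim_equal_segment_text_with_terminals_py := by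
  intro text terminals maxv hdom hpre
  unfold Spec_segment_text_with_terminals_py
  have h1 : 1 ≤ maxv := hpre
  unfold segment_text_with_terminals_py segment_text_with_terminals_py_alt
  by_cases hemp : text.toList.isEmpty = true
  · rw [if_pos hemp, if_pos hemp]
  · rw [if_neg hemp, if_neg hemp]
    have hterms := pvTermList_ne_nil terminals
    have hexp : ∀ l : List (List String), l.map pvExpand = l := by
      intro l
      have : pvExpand = id := funext pvExpand_id
      rw [this, List.map_id]
    rw [hexp]
    have hhead : (pvBuildB (pvTermList terminals) maxv text.toList
        (pvReach (pvTermList terminals) text.toList) text.toList.length).headD [] =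
        (pvBuildB (pvTermList terminals) maxv text.toList
        (pvReach (pvTermList terminals) text.toList) text.toList.length).getD 0 [] := by
      cases hn : text.toList.length with
      | zero => rfl
      | succ m => simp [pvBuildB]
    rw [hhead]
    rw [pvBuildB_eq (pvTermList terminals) maxv h1 text.toList hterms text.toList.length
      (le_refl _) 0 (Nat.zero_le _)
      (by rw [Nat.sub_self, Nat.zero_add]; exact pvReach_zero _ _ hterms)]
    rw [Nat.sub_self, Nat.zero_add, List.drop_zero]
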